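-- pv_equiv track=rewrite | github.com/kimByoungGoun/codetest | 3. 컴공선배/5주차/prev_mission/2512.py | calc
-- ===== SOURCE A (Python) =====
-- def calc(n, s, m):
--     low, high = 0, max(s)
--     while low <= high:
--         mid = (low + high) // 2
--         num = 0
--         for i in s:
--             if i >= mid: num += mid
--             else: num += i
--         if num <= m:
--             low = mid + 1
--         else:
--             high = mid - 1
--     return(high)
-- ===== SOURCE B (Python) =====
-- def calc(n, s, m):
--     # Sort requests once; on each linear region of the capped-sum function,
--     # solve "prefix + remaining*c <= m" by floor division and keep the best cap.
--     xs = sorted(s)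
--     ans = -1
--     pre = 0
--     rem = len(xs)
--     lo = 0
--     for x in xs:
--         c = (m - pre) // rem
--         if c > x:
--             c = x
--         if c >= lo and c > ans:
--             ans = c
--         pre += x
--         rem -= 1
--         lo = max(x + 1, 0)
--     return ans
-- ===== Notes on version B (the rewrite author's own statement) =====
-- stated objective: faster
-- what changed: Replaces the binary search over the cap value (each step re-summing the whole list) by one sort plus a single scan that solves each linear region of the capped-sum function analytically with a floor division.
-- intended difference: On nonempty lists whose every element is <= -2 the loop of A never runs and A returns max(s) unchecked against the budget, while B returns -1 (no cap in [0, max(s)] exists); -1, the usual 'infeasible' answer of this binary search, is the intended value. — e.g. on calc(1, [-5], 0): A returns -5, B returns -1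
import Mathlib
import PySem

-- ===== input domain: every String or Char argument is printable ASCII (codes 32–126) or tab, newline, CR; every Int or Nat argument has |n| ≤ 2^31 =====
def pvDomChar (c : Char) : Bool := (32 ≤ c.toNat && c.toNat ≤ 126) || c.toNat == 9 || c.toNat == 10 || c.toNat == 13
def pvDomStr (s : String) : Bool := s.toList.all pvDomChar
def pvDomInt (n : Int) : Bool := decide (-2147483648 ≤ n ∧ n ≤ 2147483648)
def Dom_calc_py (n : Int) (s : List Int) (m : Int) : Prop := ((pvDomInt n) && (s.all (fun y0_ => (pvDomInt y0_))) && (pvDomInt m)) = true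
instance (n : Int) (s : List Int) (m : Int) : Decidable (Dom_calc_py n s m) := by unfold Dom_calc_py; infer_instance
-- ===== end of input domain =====

-- B replaces A's binary search over the cap by sort + one analytic scan (faster); on all-(≤ -2) lists
-- A returns max(s) without ever checking the budget while B returns -1 (see D_calc_py below).

-- ===== PORT A =====
-- termination measure facts for calcLoop (cited by name in decreasing_by)
lemma calcLoop_dec1 (low high : Int) (h : low ≤ high) :
    (high + 1 - (PySem.Int.floordiv (low + high) 2 + 1)).toNat < (high + 1 - low).toNat := by
  have := PySem.Int.floordiv_two_mid_bounds h; omega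

lemma calcLoop_dec2 (low high : Int) (h : low ≤ high) :
    (PySem.Int.floordiv (low + high) 2 - 1 + 1 - low).toNat < (high + 1 - low).toNat := by
  have := PySem.Int.floordiv_two_mid_bounds h; omega

-- while low <= high: mid = (low+high)//2; num = sum of min-capped values; move low or high
def calcLoop (s : List Int) (m : Int) (low high : Int) : Int :=
  if _h : low ≤ high then
    let mid := PySem.Int.floordiv (low + high) 2
    let num := s.foldl (fun num i => if i ≥ mid then num + mid else num + i) 0
    if num ≤ m then calcLoop s m (mid + 1) high
    else calcLoop s m low (mid - 1)
  else high
termination_by (high + 1 - low).toNat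
decreasing_by
  · exact calcLoop_dec1 low high _h
  · exact calcLoop_dec2 low high _h

def calc_py (n : Int) (s : List Int) (m : Int) : Int :=
  match PySem.List.max? s (fun x => x) with
  | none => 0          -- max(s) raises ValueError on an empty list: excluded by Pre_calc_py
  | some mx => calcLoop s m 0 mx

-- ===== PORT B =====
-- for x in sorted(s): candidate cap per linear region, keep the best
def altLoop (m : Int) (xs : List Int) (ans pre rem lo : Int) : Int :=
  match xs with
  | [] => ans
  | x :: t =>
    let c0 := PySem.Int.floordiv (m - pre) rem
    let c := if c0 > x then x else c0
    let ans' := if c ≥ lo ∧ c > ans then c else ans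
    altLoop m t ans' (pre + x) (rem - 1) (max (x + 1) 0)

def calc_py_alt (n : Int) (s : List Int) (m : Int) : Int :=
  let xs := PySem.List.sorted s (fun x => x) false
  altLoop m xs (-1) 0 (xs.length : Int) 0

-- ===== PRECONDITION & SPEC =====
-- Pre_ excludes only the empty list, on which A's max(s) raises ValueError.
def Pre_calc_py (n : Int) (s : List Int) (m : Int) : Prop := s ≠ []
instance (n : Int) (s : List Int) (m : Int) : Decidable (Pre_calc_py n s m) := by unfold Pre_calc_py; infer_instance
def pvWitness_calc_py : Int × List Int × Int := (3, [1, 5, 7], 9)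

-- On nonempty lists whose every element is ≤ -2, A's loop never runs and A returns max(s)
-- unchecked against the budget, while B returns -1 (no cap in [0, max(s)] exists); -1, the usual
-- 'infeasible' answer of this binary search, is the intended value.
def D_calc_py (n : Int) (s : List Int) (m : Int) : Prop := s ≠ [] ∧ ∀ i ∈ s, i ≤ -2
instance (n : Int) (s : List Int) (m : Int) : Decidable (D_calc_py n s m) := by unfold D_calc_py; infer_instance

def Spec_calc_py (n : Int) (s : List Int) (m : Int) (out : Int) : Prop := ¬ D_calc_py n s m → out = calc_py_alt n s m
instance (n : Int) (s : List Int) (m : Int) (out : Int) : Decidable (Spec_calc_py n s m out) := by unfold Spec_calc_py; infer_instance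

def pvDiffWitness_calc_py : Int × List Int × Int := (1, [-5], 0)
def pvDiffWitnessOut_calc_py : Int × Int := (-5, -1)

-- ===== CLAIM (what is proved, stated in full; the proofs are below) =====
def Claim_unchanged_calc_py : Prop := ∀ (n : Int) (s : List Int) (m : Int), Dom_calc_py n s m → Pre_calc_py n s m → Spec_calc_py n s m (calc_py n s m)
def Claim_changed_calc_py : Prop := Dom_calc_py (pvDiffWitness_calc_py.1) (pvDiffWitness_calc_py.2.1) (pvDiffWitness_calc_py.2.2) ∧ Pre_calc_py (pvDiffWitness_calc_py.1) (pvDiffWitness_calc_py.2.1) (pvDiffWitness_calc_py.2.2) ∧ D_calc_py (pvDiffWitness_calc_py.1) (pvDiffWitness_calc_py.2.1) (pvDiffWitness_calc_py.2.2) ∧ calc_py (pvDiffWitness_calc_py.1) (pvDiffWitness_calc_py.2.1) (pvDiffWitness_calc_py.2.2) = pvDiffWitnessOut_calc_py.1 ∧ calc_py_alt (pvDiffWitness_calc_py.1) (pvDiffWitness_calc_py.2.1) (pvDiffWitness_calc_py.2.2) = pvDiffWitnessOut_calc_py.2 ∧ pvDiffWitnessOut_calc_py.1 ≠ pvDiff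WitnessOut_calc_py.2
def Claim_exact_calc_py : Prop := ∀ (n : Int) (s : List Int) (m : Int), Dom_calc_py n s m → Pre_calc_py n s m → D_calc_py n s m → calc_py n s m ≠ calc_py_alt n s m

-- ===== LEMMAS AND PROOFS =====

-- the capped sum computed by A's inner loop: sum of min(i, c)
def fsum (s : List Int) (c : Int) : Int := (s.map (fun i => min i c)).sum

lemma foldl_eq_fsum (s : List Int) (mid : Int) : ∀ acc : Int,
    s.foldl (fun num i => if i ≥ mid then num + mid else num + i) acc = acc + fsum s mid := by
  induction s with
  | nil => intro acc; simp [fsum]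
  | cons x t ih =>
    intro acc
    simp only [List.foldl_cons, fsum, List.map_cons, List.sum_cons] at *
    rw [ih]
    split_ifs with h <;> simp [min_def] <;> omega

lemma fsum_mono (s : List Int) {c c' : Int} (h : c ≤ c') : fsum s c ≤ fsum s c' := by
  induction s with
  | nil => simp [fsum]
  | cons x t ih =>
    simp only [fsum, List.map_cons, List.sum_cons] at *
    have : min x c ≤ min x c' := by omega
    omega

lemma fsum_perm {s s' : List Int} (h : s.Perm s') (c : Int) : fsum s c = fsum s' c :=
  List.Perm.sum_eq (h.map _)

lemma fsum_cons (x : Int) (t : List Int) (c : Int) : fsum (x :: t) c = min x c + fsum t c := by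
  simp [fsum]

lemma fsum_all_ge (xs : List Int) (c : Int) (h : ∀ i ∈ xs, c ≤ i) :
    fsum xs c = (xs.length : Int) * c := by
  induction xs with
  | nil => simp [fsum]
  | cons x t ih =>
    have hx : c ≤ x := h x (by simp)
    rw [fsum_cons, ih (fun i hi => h i (by simp [hi]))]
    simp [min_def]
    split_ifs <;> push_cast <;> ring_nf <;> omega

-- characterisation of the answer: the largest cap in [0, M] whose capped sum fits, else -1
def Good (s : List Int) (m M h : Int) : Prop :=
  (h = -1 ∨ (0 ≤ h ∧ h ≤ M ∧ fsum s h ≤ m)) ∧ ∀ c, h < c → 0 ≤ c → c ≤ M → m < fsum s c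

lemma Good_unique {s : List Int} {m M h1 h2 : Int}
    (g1 : Good s m M h1) (g2 : Good s m M h2) : h1 = h2 := by
  by_contra hne
  rcases lt_or_gt_of_ne hne with hlt | hlt
  · rcases g2.1 with rfl | ⟨h0, hM, hf⟩
    · rcases g1.1 with rfl | ⟨h0, _, _⟩ <;> omega
    · exact absurd hf (not_le.mpr (g1.2 h2 hlt h0 hM))
  · rcases g1.1 with rfl | ⟨h0, hM, hf⟩
    · rcases g2.1 with rfl | ⟨h0, _, _⟩ <;> omega
    · exact absurd hf (not_le.mpr (g2.2 h1 hlt h0 hM))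

-- A's binary search reaches a Good value
lemma calcLoop_good (s : List Int) (m M : Int) :
    ∀ k : Nat, ∀ low high : Int, (high + 1 - low).toNat = k →
    0 ≤ low → high ≤ M → low ≤ high + 1 →
    (0 < low → fsum s (low - 1) ≤ m) →
    (high < M → m < fsum s (high + 1)) →
    Good s m M (calcLoop s m low high) := by
  intro k
  induction k using Nat.strong_induction_on with
  | _ k ih =>
    intro low high hk hlow hhigh hle hlo hhi
    rw [calcLoop]
    split_ifs with h
    · have hb := PySem.Int.floordiv_two_mid_bounds h
      set mid := PySem.Int.floordiv (low + high) 2 with hmid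
      simp only [foldl_eq_fsum, zero_add]
      split_ifs with hnum
      · exact ih ((high + 1 - (mid + 1)).toNat) (by omega) (mid + 1) high rfl (by omega) hhigh (by omega)
          (fun _ => by simpa using hnum) hhi
      · exact ih ((mid - low).toNat) (by omega) low (mid - 1) (by omega) hlow (by omega) (by omega) hlo
          (fun _ => by simpa using not_le.mp hnum)
    · constructor
      · by_cases h0 : 0 ≤ high
        · right
          refine ⟨h0, hhigh, ?_⟩
          have h2 := hlo (by omega)
          have h3 : low - 1 = high := by omega
          rw [← h3]; exact h2
        · left; omega
      · intro c hc hc0 hcM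
        have h1 : high < M := by omega
        have := hhi h1
        have : fsum s (high + 1) ≤ fsum s c := fsum_mono s (by omega)
        omega

-- B's scan reaches a Good value
lemma altLoop_good (s : List Int) (m M : Int) :
    ∀ (xs : List Int) (ans pre lo : Int),
    List.Pairwise (· ≤ ·) xs →
    0 ≤ lo →
    (lo = 0 ∨ ∀ i ∈ xs, lo - 1 ≤ i) →
    (∀ c, lo - 1 ≤ c → fsum s c = pre + fsum xs c) →
    (∀ h : xs ≠ [], xs.getLast h = M) →
    (xs = [] → lo = max (M + 1) 0) →
    (ans = -1 ∨ (0 ≤ ans ∧ ans ≤ lo - 1 ∧ fsum s ans ≤ m)) →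
    (∀ c, ans < c → 0 ≤ c → c ≤ lo - 1 → m < fsum s c) →
    Good s m M (altLoop m xs ans pre (xs.length : Int) lo) := by
  intro xs
  induction xs with
  | nil =>
    intro ans pre lo _ hlo0 _ _ _ hfin hans hrej
    have hlofin := hfin rfl
    simp only [altLoop]
    constructor
    · rcases hans with rfl | ⟨h0, h1, h2⟩
      · left; rfl
      · right
        refine ⟨h0, ?_, h2⟩
        rcases max_cases (M + 1) 0 with ⟨hm1, hm2⟩ | ⟨hm1, hm2⟩ <;> omega
    · intro c hc hc0 hcM
      refine hrej c hc hc0 ?_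
      rcases max_cases (M + 1) 0 with ⟨hm1, hm2⟩ | ⟨hm1, hm2⟩ <;> omega

  | cons x t ih =>
    intro ans pre lo hpw hlo0 hbound hlink hlast hfin hans hrej
    obtain ⟨hxt, hpwt⟩ := List.pairwise_cons.mp hpw
    have hrem : ((x :: t).length : Int) = (t.length : Int) + 1 := by push_cast [List.length_cons]; ring
    have hrempos : (0 : Int) < ((x :: t).length : Int) := by omega
    have hx : lo = 0 ∨ lo - 1 ≤ x := by
      rcases hbound with h | h
      · left; exact h
      · right; exact h x (by simp)
    -- one unfolding of the loop
    simp only [altLoop]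
    have hlen : ((x :: t).length : Int) - 1 = (t.length : Int) := by omega
    rw [hlen]
    set rem : Int := ((x :: t).length : Int) with hremdef
    set c0 : Int := PySem.Int.floordiv (m - pre) rem with hc0
    set c : Int := if c0 > x then x else c0 with hc
    have hcx : c ≤ x ∧ (c = x ∨ c = c0) := by
      rw [hc]; split_ifs with h
      · exact ⟨le_refl x, Or.inl rfl⟩
      · exact ⟨by omega, Or.inr rfl⟩
    have hcc0 : c ≤ c0 := by
      rw [hc]; split_ifs with h <;> omega
    -- the capped sum is linear on the region [lo, x]
    have hflin : ∀ c', lo - 1 ≤ c' → c' ≤ x → fsum s c' = pre + rem * c' := by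
      intro c' h1 h2
      rw [hlink c' h1, fsum_all_ge (x :: t) c']
      intro i hi
      rcases List.mem_cons.mp hi with rfl | hi
      · exact h2
      · exact le_trans h2 (hxt i hi)
    -- c' ≤ c0 ↔ the capped sum at c' fits the budget (on the linear region)
    have hdivle : ∀ c', c' ≤ c0 → rem * c' ≤ m - pre := by
      intro c' h1
      have := (PySem.Int.le_floordiv_iff_mul_le hrempos (q := c') (a := m - pre)).mp (le_trans h1 (le_refl c0))
      linarith [this, mul_comm c' rem]
    have hdivgt : ∀ c', c0 < c' → m - pre < rem * c' := by
      intro c' h1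
      by_contra hcon
      have h2 : c' * rem ≤ m - pre := by linarith [mul_comm rem c', not_lt.mp hcon]
      have := (PySem.Int.le_floordiv_iff_mul_le hrempos (q := c') (a := m - pre)).mpr h2
      omega
    have happly := ih (if c ≥ lo ∧ c > ans then c else ans) (pre + x) (max (x + 1) 0) hpwt
      (le_max_right _ _)
      (by
        rcases max_cases (x + 1) 0 with ⟨hm1, hm2⟩ | ⟨hm1, hm2⟩
        · exact Or.inr (fun i hi => by have := hxt i hi; omega)
        · exact Or.inl (by omega))
      (by
        intro c' hc'
        have hxc' : x ≤ c' := by rcases max_cases (x + 1) 0 with ⟨hm1, hm2⟩ | ⟨hm1, hm2⟩ <;> omega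
        have hlo' : lo - 1 ≤ c' := by rcases hx with rfl | h <;> omega
        rw [hlink c' hlo', fsum_cons, min_eq_left hxc']
        ring)
      (by
        intro ht
        have hne : (x :: t) ≠ [] := by simp
        rw [← hlast hne, List.getLast_cons ht])
      (by
        intro ht
        subst ht
        have hne : [x] ≠ ([] : List Int) := by simp
        have := hlast hne
        simp [List.getLast] at this
        rw [this])
      (by
        split_ifs with hacc
        · right
          refine ⟨by omega, by rcases max_cases (x + 1) 0 with ⟨hm1, hm2⟩ | ⟨hm1, hm2⟩ <;> omega, ?_⟩
          have h1 : lo - 1 ≤ c := by omega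
          rw [hflin c h1 hcx.1]
          have := hdivle c hcc0
          omega
        · rcases hans with rfl | ⟨h0, h1, h2⟩
          · left; rfl
          · right
            refine ⟨h0, ?_, h2⟩
            rcases hx with rfl | hlx <;> rcases max_cases (x + 1) 0 with ⟨hm1, hm2⟩ | ⟨hm1, hm2⟩ <;> omega)
      (by
        intro c' hcans hc'0 hc'hi
        have hc'x : c' ≤ x := by rcases max_cases (x + 1) 0 with ⟨hm1, hm2⟩ | ⟨hm1, hm2⟩ <;> omega
        by_cases hreg : c' ≤ lo - 1
        · refine hrej c' ?_ hc'0 hreg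
          split_ifs at hcans with hacc
          · omega
          · exact hcans
        · have hlloc' : lo ≤ c' := by omega
          rw [hflin c' (by omega) hc'x]
          by_cases hcmp : c0 < c'
          · have := hdivgt c' hcmp
            omega
          · exfalso
            have hcc' : c' ≤ c := by
              rw [hc]; split_ifs with h <;> omega
            split_ifs at hcans with hacc
            · omega
            · push_neg at hacc
              have : c ≤ ans := hacc (by omega)
              omega)
    exact happly


lemma getLast_is_max : ∀ (xs : List Int) (h : xs ≠ []), xs.Pairwise (· ≤ ·) → ∀ i ∈ xs, i ≤ xs.getLast h := by
  intro xs
  induction xs with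
  | nil => intro h; simp at h
  | cons x t ih =>
    intro h hpw i hi
    obtain ⟨hxt, hpwt⟩ := List.pairwise_cons.mp hpw
    cases t with
    | nil => simp at hi; simp [hi, List.getLast]
    | cons y u =>
      rw [List.getLast_cons (by simp)]
      rcases List.mem_cons.mp hi with rfl | hi
      · exact le_trans (hxt _ (List.getLast_mem _)) (le_refl _)
      · exact ih (by simp) hpwt i hi


lemma calc_py_alt_good (n : Int) (s : List Int) (m M : Int) (hs : s ≠ [])
    (hM : PySem.List.max? s (fun x => x) = some M) :
    Good s m M (calc_py_alt n s m) := by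
  have hperm := PySem.List.sorted_perm s (fun x => x) false
  have hpw : (PySem.List.sorted s (fun x => x) false).Pairwise (· ≤ ·) := by
    simpa using PySem.List.sorted_pairwise s (fun x => x)
  have hne : PySem.List.sorted s (fun x => x) false ≠ [] := by
    intro h
    exact hs ((PySem.List.sorted_eq_nil_iff s (fun x => x) false).mp h)
  have hmem : ∀ i ∈ s, i ≤ M := by
    intro i hi
    simpa using PySem.List.max?_isMax hM i hi
  have hMmem : M ∈ s := PySem.List.max?_mem hM
  have hlastM : ∀ h : (PySem.List.sorted s (fun x => x) false) ≠ [],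
      (PySem.List.sorted s (fun x => x) false).getLast h = M := by
    intro h
    have h1 : (PySem.List.sorted s (fun x => x) false).getLast h ≤ M := by
      apply hmem
      exact hperm.mem_iff.mp (List.getLast_mem h)
    have h2 : M ≤ (PySem.List.sorted s (fun x => x) false).getLast h := by
      apply getLast_is_max _ h hpw
      exact hperm.mem_iff.mpr hMmem
    omega
  unfold calc_py_alt
  apply altLoop_good s m M _ (-1) 0 0 hpw (le_refl 0) (Or.inl rfl)
  · intro c _
    rw [fsum_perm hperm.symm c]
    ring
  · exact hlastM
  · intro h; exact absurd h hne
  · left; rfl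
  · intro c h1 h2 h3; omega

lemma calc_py_good (n : Int) (s : List Int) (m M : Int) (hs : s ≠ [])
    (hM : PySem.List.max? s (fun x => x) = some M) (hM1 : -1 ≤ M) :
    Good s m M (calc_py n s m) := by
  unfold calc_py
  rw [hM]
  exact calcLoop_good s m M _ 0 M rfl (le_refl 0) (le_refl M) (by omega)
    (by omega) (by omega)


-- ===== VERDICT (by name: the statement is the Claim_ definition above) =====
theorem calc_py_spec : Claim_unchanged_calc_py := by
  intro n s m _ hpre hnd
  unfold Pre_calc_py at hpre
  obtain ⟨M, hM⟩ : ∃ M, PySem.List.max? s (fun x => x) = some M := by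
    cases h : PySem.List.max? s (fun x => x) with
    | none => exact absurd ((PySem.List.max?_eq_none_iff _ _).mp h) hpre
    | some M => exact ⟨M, rfl⟩
  have hM1 : -1 ≤ M := by
    unfold D_calc_py at hnd
    push_neg at hnd
    obtain ⟨i, hi, hgt⟩ := hnd hpre
    have := PySem.List.max?_isMax hM i hi
    simp at this
    omega
  exact Good_unique (calc_py_good n s m M hpre hM hM1) (calc_py_alt_good n s m M hpre hM)

theorem calc_py_changed : Claim_changed_calc_py := by
  unfold Claim_changed_calc_py
  refine ⟨by decide, by decide, by decide, ?_, by decide, by decide⟩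
  show calc_py 1 [-5] 0 = -5
  have h1 : calc_py 1 [-5] 0 = calcLoop [-5] 0 0 (-5) := rfl
  rw [h1, calcLoop]
  norm_num

theorem calc_py_tight : Claim_exact_calc_py := by
  intro n s m _ hpre hd
  unfold Pre_calc_py at hpre
  obtain ⟨-, hall⟩ := hd
  obtain ⟨M, hM⟩ : ∃ M, PySem.List.max? s (fun x => x) = some M := by
    cases h : PySem.List.max? s (fun x => x) with
    | none => exact absurd ((PySem.List.max?_eq_none_iff _ _).mp h) hpre
    | some M => exact ⟨M, rfl⟩
  have hM2 : M ≤ -2 := hall M (PySem.List.max?_mem hM)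
  have hA : calc_py n s m = M := by
    unfold calc_py
    rw [hM]
    show calcLoop s m 0 M = M
    rw [calcLoop]
    rw [dif_neg (by omega)]
  have hB : calc_py_alt n s m = -1 := by
    have hg := calc_py_alt_good n s m M hpre hM
    rcases hg.1 with h | ⟨h0, h1, _⟩
    · exact h
    · omega
  rw [hA, hB]
  omega
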